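-- pv_equiv track=rewrite | github.com/MateusMaccos/game-resta-um | jogo.py | linha_clicada
-- ===== SOURCE A (Python) =====
-- ALTURA = 800
--
-- def linha_clicada(pos):
--     y = pos[1]
--     for i in range(1, 7):
--         if y < i * (ALTURA) / 7:
--             return i - 1
--     if y > ALTURA:
--         return -1
--     return 6
-- ===== SOURCE B (Python) =====
-- def linha_clicada(pos):
--     # integer closed form: k = floor(7*y/800); bands are y < i*800/7 <=> 7*y < 800*i
--     k = 7 * pos[1] // 800
--     if k <= 5:
--         return max(k, 0)
--     return -1 if pos[1] > 800 else 6
-- ===== Notes on version B (the rewrite author's own statement) =====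
-- stated objective: simpler
-- what changed: Replaced A's linear scan over six float thresholds with one closed-form integer computation k = 7*y // 800 (exact because no integer lies between each exact threshold 800*i/7 and its double rounding).
import Mathlib
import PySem

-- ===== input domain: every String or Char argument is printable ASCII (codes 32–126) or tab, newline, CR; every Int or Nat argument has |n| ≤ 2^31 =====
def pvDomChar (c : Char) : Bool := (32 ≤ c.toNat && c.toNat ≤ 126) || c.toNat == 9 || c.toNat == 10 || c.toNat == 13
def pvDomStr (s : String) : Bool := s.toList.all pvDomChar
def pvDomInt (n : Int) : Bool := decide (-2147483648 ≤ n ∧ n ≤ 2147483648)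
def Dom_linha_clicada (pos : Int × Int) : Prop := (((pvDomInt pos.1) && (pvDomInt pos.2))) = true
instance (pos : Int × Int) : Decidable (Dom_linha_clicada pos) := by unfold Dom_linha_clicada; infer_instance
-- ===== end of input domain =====

-- B replaces A's six-step threshold scan with one closed-form integer division (objective: simpler).
-- A's float test `y < i*800/7` is ported as the exact integer test `7*y < 800*i`: for integer y this is
-- exact, since no integer lies between the exact rational 800*i/7 (distance ≥ 1/7 from any integer,
-- i = 1..6) and its nearest-double rounding (error < 1e-10).

-- ===== PORT A =====
-- A scans i = 1..6 and returns (i-1) at the first i with y < i*800/7; the early return is the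
-- first hit of findSome? over the same range.
def linhaLoopA (y : Int) : List Int → Option Int
  | [] => none
  | i :: rest => if 7 * y < 800 * i then some (i - 1) else linhaLoopA y rest

def linha_clicada (pos : Int × Int) : Int :=
  let y := pos.2
  match linhaLoopA y (PySem.List.pyRange 1 7 1) with
  | some r => r
  | none => if y > 800 then -1 else 6

-- ===== PORT B =====
def linha_clicada_alt (pos : Int × Int) : Int :=
  let k := PySem.Int.floordiv (7 * pos.2) 800
  if k ≤ 5 then max k 0
  else if pos.2 > 800 then -1 else 6

-- ===== PRECONDITION & SPEC =====
def Spec_linha_clicada (pos : Int × Int) (out : Int) : Prop := out = linha_clicada_alt pos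
instance (pos : Int × Int) (out : Int) : Decidable (Spec_linha_clicada pos out) := by unfold Spec_linha_clicada; infer_instance

-- ===== CLAIM (what is proved, stated in full; the proofs are below) =====
def Claim_equal_linha_clicada : Prop := ∀ (pos : Int × Int), Dom_linha_clicada pos → Spec_linha_clicada pos (linha_clicada pos)

-- ===== LEMMAS AND PROOFS =====

theorem pyRange_1_7 : PySem.List.pyRange 1 7 1 = [1, 2, 3, 4, 5, 6] := by decide

-- ===== VERDICT (by name: the statement is the Claim_ definition above) =====
theorem linha_clicada_spec : Claim_equal_linha_clicada := by
  intro pos _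
  unfold Spec_linha_clicada linha_clicada linha_clicada_alt
  rcases pos with ⟨x, y⟩
  simp only [pyRange_1_7, linhaLoopA, PySem.Int.floordiv]
  rw [Int.fdiv_eq_ediv]
  split_ifs <;> simp_all <;> omega
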